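-- pv_equiv track=rewrite | github.com/gregorylimeurhen/snekboros | src/utils.py | _step_tuple
-- ===== SOURCE A (Python) =====
-- def _step_tuple(extent, snake, food, act):
-- 	dr = snake[0][0] - snake[1][0]
-- 	dc = snake[0][1] - snake[1][1]
-- 	if act == -1:
-- 		dr, dc = -dc, dr
-- 	if act == 1:
-- 		dr, dc = dc, -dr
-- 	head = snake[0][0] + dr, snake[0][1] + dc
-- 	grew = head == food
-- 	if grew:
-- 		snake = (head,) + snake
-- 	else:
-- 		snake = (head,) + snake[:-1]
-- 	body = set(snake[1:])
-- 	inside = 1 <= head[0] <= extent and 1 <= head[1] <= extent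
-- 	if not inside or head in body:
-- 		return snake, None, False, False, False
-- 	if not grew:
-- 		return snake, food, True, False, False
-- 	used = set(snake)
-- 	for row in range(1, extent + 1):
-- 		for col in range(1, extent + 1):
-- 			cell = row, col
-- 			if cell not in used:
-- 				return snake, cell, True, False, True
-- 	return snake, None, False, True, True
-- ===== SOURCE B (Python) =====
-- def _rotated(p, q, act):
--     dr, dc = p[0] - q[0], p[1] - q[1]
--     if act == -1 or act == 1:
--         return act * dc, -act * dr
--     return dr, dc
--
--
-- def _free_cell(extent, occupied):
--     # first row-major grid cell not occupied, via a first-gap scan of the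
--     # sorted linear indices of the occupied in-grid cells; None if grid full
--     occ = sorted((r - 1) * extent + (c - 1) for (r, c) in occupied
--                  if 1 <= r <= extent and 1 <= c <= extent)
--     k = 0
--     for v in occ:
--         if v != k:
--             break
--         k += 1
--     if k < extent * extent:
--         return (k // extent + 1, k % extent + 1)
--     return None
--
--
-- def _step_tuple(extent, snake, food, act):
--     dr, dc = _rotated(snake[0], snake[1], act)
--     head = (snake[0][0] + dr, snake[0][1] + dc)
--     grew = head == food
--     body = snake if grew else snake[:-1]
--     new = (head,) + body
--     crash = not (1 <= head[0] <= extent and 1 <= head[1] <= extent) or head in body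
--     if crash:
--         return new, None, False, False, False
--     if not grew:
--         return new, food, True, False, False
--     cell = _free_cell(extent, set(new))
--     if cell is None:
--         return new, None, False, True, True
--     return new, cell, True, False, True
-- ===== Notes on version B (the rewrite author's own statement) =====
-- stated objective: alternative
-- what changed: B factors the step into rotation and free-cell helpers and replaces A's row-by-row grid scan for the new food cell by a first-gap search on the sorted row-major linear indices of the occupied in-grid cells (collision via list membership instead of a hash set).
import Mathlib
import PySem

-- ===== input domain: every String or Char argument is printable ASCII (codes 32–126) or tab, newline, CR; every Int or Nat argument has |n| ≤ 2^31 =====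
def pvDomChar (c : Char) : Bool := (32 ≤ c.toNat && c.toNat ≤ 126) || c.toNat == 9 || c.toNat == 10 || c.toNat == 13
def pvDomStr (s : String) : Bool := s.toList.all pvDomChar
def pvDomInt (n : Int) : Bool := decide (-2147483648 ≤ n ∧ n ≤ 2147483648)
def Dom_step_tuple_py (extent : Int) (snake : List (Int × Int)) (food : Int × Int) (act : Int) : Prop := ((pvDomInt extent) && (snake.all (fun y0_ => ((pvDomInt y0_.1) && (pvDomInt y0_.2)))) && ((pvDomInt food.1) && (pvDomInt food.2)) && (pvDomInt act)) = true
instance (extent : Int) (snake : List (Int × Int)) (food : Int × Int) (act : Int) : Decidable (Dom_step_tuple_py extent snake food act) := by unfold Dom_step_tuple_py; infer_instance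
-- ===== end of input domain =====

-- B replaces A's row-by-row grid scan for the new food cell by a first-gap search on the
-- sorted row-major indices of the occupied in-grid cells, and factors the step into
-- rotation / free-cell helpers (objective: alternative algorithm).

-- ===== PORT A =====
def step_tuple_py (extent : Int) (snake : List (Int × Int)) (food : Int × Int) (act : Int) : (List (Int × Int)) × (Option (Int × Int)) × Bool × Bool × Bool :=
  let s0 := PySem.List.pyGetD snake 0 (0, 0)
  let s1 := PySem.List.pyGetD snake 1 (0, 0)
  let dr0 := s0.1 - s1.1
  let dc0 := s0.2 - s1.2
  let d1 := if act = -1 then (-dc0, dr0) else (dr0, dc0)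
  let d2 := if act = 1 then (d1.2, -d1.1) else d1
  let head := (s0.1 + d2.1, s0.2 + d2.2)
  let grew := decide (head = food)
  let snake2 := if grew then head :: snake else head :: PySem.List.slice snake none (some (-1))
  let body := PySem.Set.ofList (PySem.List.slice snake2 (some 1) none)
  let inside := decide (1 ≤ head.1 ∧ head.1 ≤ extent) && decide (1 ≤ head.2 ∧ head.2 ≤ extent)
  if !inside || PySem.Set.contains body head then (snake2, none, false, false, false)
  else if !grew then (snake2, some food, true, false, false)
  else
    let used := PySem.Set.ofList snake2
    match (PySem.List.pyRange 1 (extent + 1) 1).findSome? (fun row =>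
        ((PySem.List.pyRange 1 (extent + 1) 1).find? (fun col => !PySem.Set.contains used (row, col))).map
          (fun col => (row, col))) with
    | some cell => (snake2, some cell, true, false, true)
    | none => (snake2, none, false, true, true)

-- ===== PORT B =====
-- Source B's _rotated: the new direction vector
def pvRotated (p q : Int × Int) (act : Int) : Int × Int :=
  let dr := p.1 - q.1
  let dc := p.2 - q.2
  if act = -1 ∨ act = 1 then (act * dc, -act * dr) else (dr, dc)

-- Source B's first-gap loop inside _free_cell
def firstGap : List Int → Int → Int
  | [], k => k
  | v :: rest, k => if v = k then firstGap rest (k + 1) else k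

-- Source B's _free_cell: first row-major grid cell not occupied, None if the grid is full
def pvFreeCell (extent : Int) (occupied : List (Int × Int)) : Option (Int × Int) :=
  let occ := PySem.List.sorted ((occupied.filter
      (fun p => decide (1 ≤ p.1 ∧ p.1 ≤ extent ∧ 1 ≤ p.2 ∧ p.2 ≤ extent))).map
      (fun p => (p.1 - 1) * extent + (p.2 - 1))) (fun x => x) false
  let k := firstGap occ 0
  if k < extent * extent then some (PySem.Int.floordiv k extent + 1, PySem.Int.mod k extent + 1)
  else none

def step_tuple_py_alt (extent : Int) (snake : List (Int × Int)) (food : Int × Int) (act : Int) : (List (Int × Int)) × (Option (Int × Int)) × Bool × Bool × Bool :=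
  let d := pvRotated (PySem.List.pyGetD snake 0 (0, 0)) (PySem.List.pyGetD snake 1 (0, 0)) act
  let head := ((PySem.List.pyGetD snake 0 (0, 0)).1 + d.1, (PySem.List.pyGetD snake 0 (0, 0)).2 + d.2)
  let grew := decide (head = food)
  let body := if grew then snake else PySem.List.slice snake none (some (-1))
  let newS := head :: body
  let crash := decide (¬ (1 ≤ head.1 ∧ head.1 ≤ extent ∧ 1 ≤ head.2 ∧ head.2 ≤ extent) ∨ head ∈ body)
  if crash then (newS, none, false, false, false)
  else if !grew then (newS, some food, true, false, false)
  else
    match pvFreeCell extent (PySem.Set.ofList newS) with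
    | none => (newS, none, false, true, true)
    | some cell => (newS, some cell, true, false, true)

-- ===== PRECONDITION & SPEC =====
-- Pre_: Python A evaluates snake[0] and snake[1], so it raises IndexError when len(snake) < 2.
def Pre_step_tuple_py (extent : Int) (snake : List (Int × Int)) (food : Int × Int) (act : Int) : Prop := 2 ≤ snake.length
instance (extent : Int) (snake : List (Int × Int)) (food : Int × Int) (act : Int) : Decidable (Pre_step_tuple_py extent snake food act) := by unfold Pre_step_tuple_py; infer_instance
def pvWitness_step_tuple_py : Int × (List (Int × Int)) × (Int × Int) × Int := (3, [(2, 2), (2, 1)], (2, 3), 0)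

def Spec_step_tuple_py (extent : Int) (snake : List (Int × Int)) (food : Int × Int) (act : Int) (out : (List (Int × Int)) × (Option (Int × Int)) × Bool × Bool × Bool) : Prop := out = step_tuple_py_alt extent snake food act
instance (extent : Int) (snake : List (Int × Int)) (food : Int × Int) (act : Int) (out : (List (Int × Int)) × (Option (Int × Int)) × Bool × Bool × Bool) : Decidable (Spec_step_tuple_py extent snake food act out) := by unfold Spec_step_tuple_py; infer_instance

-- ===== CLAIM (what is proved, stated in full; the proofs are below) =====
def Claim_equal_step_tuple_py : Prop := ∀ (extent : Int) (snake : List (Int × Int)) (food : Int × Int) (act : Int), Dom_step_tuple_py extent snake food act → Pre_step_tuple_py extent snake food act → Spec_step_tuple_py extent snake food act (step_tuple_py extent snake food act)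

-- ===== LEMMAS AND PROOFS =====

-- lexicographic order on cells (Python tuple <)
def pvLexLt (a b : Int × Int) : Prop := a.1 < b.1 ∨ (a.1 = b.1 ∧ a.2 < b.2)

lemma pv_contains_ofList {α : Type} [BEq α] [LawfulBEq α] (l : List α) (x : α) :
    PySem.Set.contains (PySem.Set.ofList l) x = l.contains x := by
  by_cases hm : x ∈ l <;>
    simp [PySem.Set.contains_eq_listContains, PySem.Set.mem_ofList, hm]

-- nested early-return loops = find? over the flattened grid
lemma pv_findSome?_nested {α β : Type} (rows : List α) (cols : List β) (p : α → β → Bool) :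
    rows.findSome? (fun r => ((cols.find? (fun c => p r c)).map (fun c => (r, c)))) =
    (rows.flatMap (fun r => cols.map (fun c => (r, c)))).find? (fun rc => p rc.1 rc.2) := by
  induction rows with
  | nil => simp
  | cons a t ih =>
    simp only [List.findSome?_cons, List.flatMap_cons, List.find?_append, ← ih,
      List.find?_map, Function.comp_def]
    rcases h : cols.find? (fun c => p a c) with _ | c <;> simp [h]

lemma pv_firstGap_spec (occ : List Int) (h : occ.Pairwise (· < ·)) :
    ∀ k : Int, (∀ v ∈ occ, k ≤ v) →
      k ≤ firstGap occ k ∧ (∀ j, k ≤ j → j < firstGap occ k → j ∈ occ) ∧ firstGap occ k ∉ occ := by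
  induction occ with
  | nil => intro k _; simp [firstGap]
  | cons v rest ih =>
    intro k hk
    rw [List.pairwise_cons] at h
    by_cases hv : v = k
    · subst hv
      have hfg : firstGap (v :: rest) v = firstGap rest (v + 1) := by simp [firstGap]
      have hrest : ∀ w ∈ rest, v + 1 ≤ w := fun w hw => by have := h.1 w hw; omega
      obtain ⟨h1, h2, h3⟩ := ih h.2 (v + 1) hrest
      rw [hfg]
      refine ⟨by omega, ?_, ?_⟩
      · intro j hj1 hj2
        by_cases hjv : j = v
        · simp [hjv]
        · exact List.mem_cons_of_mem _ (h2 j (by omega) hj2)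
      · intro hmem
        rcases List.mem_cons.mp hmem with h' | h'
        · omega
        · exact h3 h'
    · have hfg : firstGap (v :: rest) k = k := by simp [firstGap, hv]
      rw [hfg]
      refine ⟨le_refl _, by omega, ?_⟩
      intro hmem
      rcases List.mem_cons.mp hmem with h' | h'
      · exact hv h'.symm
      · have h1 := hk v (by simp)
        have h2 := h.1 _ h'
        omega

-- first hit of a find? on a list sorted for relation R
lemma pv_find?_eq_some {α : Type} (R : α → α → Prop) (l : List α) (hl : l.Pairwise R)
    (p : α → Bool) (x : α) (hx : x ∈ l) (hpx : p x = true)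
    (hmin : ∀ y ∈ l, R y x → p y = false) : l.find? p = some x := by
  induction l with
  | nil => cases hx
  | cons a t ih =>
    rw [List.pairwise_cons] at hl
    rcases List.mem_cons.mp hx with rfl | hxt
    · simp [hpx]
    · have hpa : p a = false := hmin a (by simp) (hl.1 x hxt)
      simp only [List.find?_cons, hpa]
      exact ih hl.2 hxt (fun y hy hR => hmin y (by simp [hy]) hR)

-- row-major linearisation is injective on in-grid cells
lemma pv_lin_inj (e : Int) (he : 1 ≤ e) {p q : Int × Int}
    (hp : 1 ≤ p.1 ∧ p.1 ≤ e ∧ 1 ≤ p.2 ∧ p.2 ≤ e)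
    (hq : 1 ≤ q.1 ∧ q.1 ≤ e ∧ 1 ≤ q.2 ∧ q.2 ≤ e)
    (h : (p.1 - 1) * e + (p.2 - 1) = (q.1 - 1) * e + (q.2 - 1)) : p = q := by
  have h1 : p.1 = q.1 := by
    rcases lt_trichotomy p.1 q.1 with hlt | heq | hgt
    · have := mul_le_mul_of_nonneg_right (show (1 : Int) ≤ q.1 - p.1 by omega)
        (show (0 : Int) ≤ e by omega)
      nlinarith
    · exact heq
    · have := mul_le_mul_of_nonneg_right (show (1 : Int) ≤ p.1 - q.1 by omega)
        (show (0 : Int) ≤ e by omega)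
      nlinarith
  have h2 : p.2 = q.2 := by rw [h1] at h; nlinarith
  exact Prod.ext_iff.mpr ⟨h1, h2⟩

lemma pv_cell_grid (e k : Int) (he : 1 ≤ e) (h0 : 0 ≤ k) (h1 : k < e * e) :
    1 ≤ k / e + 1 ∧ k / e + 1 ≤ e ∧ 1 ≤ k % e + 1 ∧ k % e + 1 ≤ e := by
  have a1 : 0 ≤ k / e := Int.ediv_nonneg h0 (by omega)
  have a2 : k / e < e := Int.ediv_lt_of_lt_mul (by omega) (by nlinarith)
  have a3 : 0 ≤ k % e := Int.emod_nonneg k (by omega)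
  have a4 : k % e < e := Int.emod_lt_of_pos k (by omega)
  omega

lemma pv_lin_cell (e k : Int) : (k / e + 1 - 1) * e + (k % e + 1 - 1) = k := by
  linear_combination Int.mul_ediv_add_emod k e

-- the heart: A's grid scan equals B's free-cell search
lemma pv_place_eq (e : Int) (he : 1 ≤ e) (used : List (Int × Int)) :
    (PySem.List.pyRange 1 (e + 1) 1).findSome? (fun row =>
        ((PySem.List.pyRange 1 (e + 1) 1).find? (fun col => !PySem.Set.contains (PySem.Set.ofList used) (row, col))).map
          (fun col => (row, col)))
    = pvFreeCell e (PySem.Set.ofList used) := by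
  unfold pvFreeCell
  set base := ((PySem.Set.ofList used).filter
      (fun p => decide (1 ≤ p.1 ∧ p.1 ≤ e ∧ 1 ≤ p.2 ∧ p.2 ≤ e))).map
      (fun p => (p.1 - 1) * e + (p.2 - 1)) with hbase
  set occ := PySem.List.sorted base (fun x => x) false with hocc
  set K := firstGap occ 0 with hK
  -- membership in occ
  have hmem_occ : ∀ v : Int, v ∈ occ ↔
      ∃ p : Int × Int, p ∈ used ∧ (1 ≤ p.1 ∧ p.1 ≤ e ∧ 1 ≤ p.2 ∧ p.2 ≤ e) ∧ (p.1 - 1) * e + (p.2 - 1) = v := by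
    intro v
    rw [hocc, PySem.List.mem_sorted, hbase]
    simp only [List.mem_map, List.mem_filter, PySem.Set.mem_ofList, decide_eq_true_eq]
    exact exists_congr (fun p => by tauto)
  -- occ is strictly increasing
  have hnodup_base : base.Nodup := by
    rw [hbase]
    refine List.Nodup.map_on ?_ ((PySem.Set.nodup_ofList used).filter _)
    intro p hp q hq hpq
    simp only [List.mem_filter, decide_eq_true_eq] at hp hq
    exact pv_lin_inj e he hp.2 hq.2 hpq
  have hpw : occ.Pairwise (· < ·) := by
    have hle : occ.Pairwise (· ≤ ·) := PySem.List.sorted_pairwise base (fun x => x)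
    have hnd : occ.Nodup := ((PySem.List.sorted_perm base (fun x => x) false).nodup_iff).mpr hnodup_base
    exact (hle.and hnd).imp (fun hab => lt_of_le_of_ne hab.1 hab.2)
  have hocc_nonneg : ∀ v ∈ occ, (0 : Int) ≤ v := by
    intro v hv
    obtain ⟨p, _, ⟨g1, g2, g3, g4⟩, hp4⟩ := (hmem_occ v).mp hv
    have := mul_nonneg (show (0 : Int) ≤ p.1 - 1 by omega) (show (0 : Int) ≤ e by omega)
    omega
  have hocc_lt : ∀ v ∈ occ, v < e * e := by
    intro v hv
    obtain ⟨p, _, ⟨g1, g2, g3, g4⟩, hp4⟩ := (hmem_occ v).mp hv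
    have := mul_le_mul_of_nonneg_right (show p.1 - 1 ≤ e - 1 by omega) (show (0 : Int) ≤ e by omega)
    nlinarith
  obtain ⟨hK0, hKmem, hKnot⟩ := pv_firstGap_spec occ hpw 0 hocc_nonneg
  -- the grid list
  set gridL := (PySem.List.pyRange 1 (e + 1) 1).flatMap
      (fun r => (PySem.List.pyRange 1 (e + 1) 1).map (fun c => (r, c))) with hgrid
  have hmem_grid : ∀ y : Int × Int, y ∈ gridL ↔ (1 ≤ y.1 ∧ y.1 ≤ e ∧ 1 ≤ y.2 ∧ y.2 ≤ e) := by
    intro y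
    rw [hgrid]
    simp only [List.mem_flatMap, List.mem_map, PySem.List.mem_pyRange_one]
    constructor
    · rintro ⟨r, ⟨hr1, hr2⟩, c, ⟨hc1, hc2⟩, rfl⟩; exact ⟨hr1, by omega, hc1, by omega⟩
    · rintro ⟨g1, g2, g3, g4⟩
      exact ⟨y.1, ⟨g1, by omega⟩, y.2, ⟨g3, by omega⟩, rfl⟩
  have hgrid_pw : gridL.Pairwise pvLexLt := by
    rw [hgrid, List.pairwise_flatMap]
    constructor
    · intro r _
      rw [List.pairwise_map]
      exact (PySem.List.pairwise_lt_pyRange_one 1 (e + 1)).imp (fun h => Or.inr ⟨rfl, h⟩)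
    · refine (PySem.List.pairwise_lt_pyRange_one 1 (e + 1)).imp ?_
      intro r1 r2 hr x hx y hy
      simp only [List.mem_map] at hx hy
      obtain ⟨c1, _, rfl⟩ := hx
      obtain ⟨c2, _, rfl⟩ := hy
      exact Or.inl hr
  -- predicate bridge
  have hpred : ∀ y : Int × Int,
      (!PySem.Set.contains (PySem.Set.ofList used) (y.1, y.2)) = !(decide (y ∈ used)) := by
    intro y
    rw [pv_contains_ofList]
    by_cases hm : y ∈ used <;> simp [hm]
  -- membership bridge: an in-grid cell is occupied iff its index is in occ
  have hbridge : ∀ y : Int × Int, (1 ≤ y.1 ∧ y.1 ≤ e ∧ 1 ≤ y.2 ∧ y.2 ≤ e) →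
      ((y.1 - 1) * e + (y.2 - 1) ∈ occ ↔ y ∈ used) := by
    intro y hy
    rw [hmem_occ]
    constructor
    · rintro ⟨p, hp1, hp2, hp3⟩
      have := pv_lin_inj e he hp2 hy hp3
      rwa [← this]
    · intro hm; exact ⟨y, hm, hy, rfl⟩
  by_cases hlt : K < e * e
  · rw [if_pos hlt]
    -- the found cell
    have hcg := pv_cell_grid e K he hK0 hlt
    rw [pv_findSome?_nested, ← hgrid]
    have hfg : PySem.Int.floordiv K e = K / e := PySem.Int.floordiv_eq_ediv_of_pos (by omega)
    have hmd : PySem.Int.mod K e = K % e := PySem.Int.mod_eq_emod_of_pos (by omega)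
    rw [hfg, hmd]
    apply pv_find?_eq_some pvLexLt gridL hgrid_pw _ (K / e + 1, K % e + 1)
    · exact (hmem_grid _).mpr hcg
    · rw [hpred]
      simp only [Bool.not_eq_eq_eq_not, Bool.not_true, decide_eq_false_iff_not]
      intro hmem
      apply hKnot
      have := (hbridge _ hcg).mpr hmem
      rwa [pv_lin_cell e K] at this
    · intro y hy hlex
      rw [hpred]
      simp only [Bool.not_eq_eq_eq_not, Bool.not_false, decide_eq_true_eq]
      have hyg := (hmem_grid y).mp hy
      -- y is lexicographically below the cell of K, hence its index is below K
      have hidx : (y.1 - 1) * e + (y.2 - 1) < K := by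
        rcases hlex with h | ⟨h1, h2⟩
        · have := mul_le_mul_of_nonneg_right (show y.1 - 1 ≤ K / e + 1 - 1 - 1 by omega)
            (show (0 : Int) ≤ e by omega)
          have hlin := pv_lin_cell e K
          nlinarith [hyg.2.2.1, hyg.2.2.2, hcg.2.2.1]
        · have hlin := pv_lin_cell e K
          nlinarith [h1, h2]
      have hnn : (0 : Int) ≤ (y.1 - 1) * e + (y.2 - 1) := by
        have := mul_nonneg (show (0 : Int) ≤ y.1 - 1 by omega) (show (0 : Int) ≤ e by omega)
        omega
      exact (hbridge y hyg).mp (hKmem _ hnn hidx)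
  · rw [if_neg hlt]
    rw [pv_findSome?_nested, ← hgrid]
    apply List.find?_eq_none.mpr
    intro y hy
    rw [hpred]
    simp only [Bool.not_eq_eq_eq_not, Bool.not_true, decide_eq_false_iff_not, not_not]
    have hyg := (hmem_grid y).mp hy
    have hnn : (0 : Int) ≤ (y.1 - 1) * e + (y.2 - 1) := by
      have := mul_nonneg (show (0 : Int) ≤ y.1 - 1 by omega) (show (0 : Int) ≤ e by omega)
      omega
    have hub : (y.1 - 1) * e + (y.2 - 1) < e * e := by
      have := mul_le_mul_of_nonneg_right (show y.1 - 1 ≤ e - 1 by omega) (show (0 : Int) ≤ e by omega)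
      nlinarith [hyg.2.2.1, hyg.2.2.2]
    exact (hbridge y hyg).mp (hKmem _ hnn (by omega))

lemma pv_slice_tail (x : Int × Int) (t : List (Int × Int)) :
    PySem.List.slice (x :: t) (some 1) none = t := by simp [pysem]

-- A's crash test (two-decide inside && set membership) = B's single decide
lemma pv_crash_eq (e : Int) (head : Int × Int) (body : List (Int × Int)) :
    (!(decide (1 ≤ head.1 ∧ head.1 ≤ e) && decide (1 ≤ head.2 ∧ head.2 ≤ e)) ||
      PySem.Set.contains (PySem.Set.ofList body) head)
    = decide (¬ (1 ≤ head.1 ∧ head.1 ≤ e ∧ 1 ≤ head.2 ∧ head.2 ≤ e) ∨ head ∈ body) := by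
  rw [pv_contains_ofList]
  by_cases hi : 1 ≤ head.1 ∧ head.1 ≤ e ∧ 1 ≤ head.2 ∧ head.2 ≤ e <;>
    by_cases hm : head ∈ body <;>
      simp [hi, hm] <;> omega

-- the whole function body after the head has been computed
lemma pv_tail (e : Int) (snake : List (Int × Int)) (food head : Int × Int) :
    (let grew := decide (head = food)
     let snake2 := if grew then head :: snake else head :: PySem.List.slice snake none (some (-1))
     let body := PySem.Set.ofList (PySem.List.slice snake2 (some 1) none)
     let inside := decide (1 ≤ head.1 ∧ head.1 ≤ e) && decide (1 ≤ head.2 ∧ head.2 ≤ e)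
     if !inside || PySem.Set.contains body head then (snake2, (none : Option (Int × Int)), false, false, false)
     else if !grew then (snake2, some food, true, false, false)
     else
       let used := PySem.Set.ofList snake2
       match (PySem.List.pyRange 1 (e + 1) 1).findSome? (fun row =>
           ((PySem.List.pyRange 1 (e + 1) 1).find? (fun col => !PySem.Set.contains used (row, col))).map
             (fun col => (row, col))) with
       | some cell => (snake2, some cell, true, false, true)
       | none => (snake2, none, false, true, true))
    =
    (let grew := decide (head = food)
     let body := if grew then snake else PySem.List.slice snake none (some (-1))
     let newS := head :: body
     let crash := decide (¬ (1 ≤ head.1 ∧ head.1 ≤ e ∧ 1 ≤ head.2 ∧ head.2 ≤ e) ∨ head ∈ body)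
     if crash then (newS, (none : Option (Int × Int)), false, false, false)
     else if !grew then (newS, some food, true, false, false)
     else
       match pvFreeCell e (PySem.Set.ofList newS) with
       | none => (newS, none, false, true, true)
       | some cell => (newS, some cell, true, false, true)) := by
  cases hgd : decide (head = food)
  · simp only [hgd, Bool.false_eq_true, if_false, Bool.not_false, if_true]
    rw [pv_slice_tail, pv_crash_eq]
  · simp only [hgd, if_true, Bool.not_true, Bool.false_eq_true, if_false]
    rw [pv_slice_tail, pv_crash_eq]
    split_ifs with hc1
    · rfl
    · have he : 1 ≤ e := by
        by_contra hne
        exact hc1 (by simp only [decide_eq_true_eq]; left; omega)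
      rw [pv_place_eq e he]
      cases pvFreeCell e (PySem.Set.ofList (head :: snake)) <;> rfl

-- B's rotation helper agrees with A's two sequential ifs
lemma pv_rot_eq (p q : Int × Int) (act : Int) :
    (if act = 1 then ((if act = -1 then (-(p.2 - q.2), p.1 - q.1) else (p.1 - q.1, p.2 - q.2)).2,
        -(if act = -1 then (-(p.2 - q.2), p.1 - q.1) else (p.1 - q.1, p.2 - q.2)).1)
      else (if act = -1 then (-(p.2 - q.2), p.1 - q.1) else (p.1 - q.1, p.2 - q.2)))
    = pvRotated p q act := by
  unfold pvRotated
  by_cases h1 : act = -1 <;> by_cases h2 : act = 1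
  · omega
  · subst h1; norm_num
  · subst h2; norm_num
  · simp [h1, h2]

-- ===== VERDICT (by name: the statement is the Claim_ definition above) =====
theorem step_tuple_py_spec : Claim_equal_step_tuple_py := by
  intro e snake food act _dom _hpre
  unfold Spec_step_tuple_py
  simp only [step_tuple_py, step_tuple_py_alt]
  rw [pv_rot_eq]
  exact pv_tail e snake food
    ((PySem.List.pyGetD snake 0 (0, 0)).1 +
        (pvRotated (PySem.List.pyGetD snake 0 (0, 0)) (PySem.List.pyGetD snake 1 (0, 0)) act).1,
      (PySem.List.pyGetD snake 0 (0, 0)).2 +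
        (pvRotated (PySem.List.pyGetD snake 0 (0, 0)) (PySem.List.pyGetD snake 1 (0, 0)) act).2)
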